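-- pv_equiv track=rewrite | github.com/abdelrhman-alarabawy/Probabilistic-bitcoin-with-ML- | source/Approach1/src/utils.py | resolve_all_candidates
-- ===== SOURCE A (Python) =====
-- from typing import Dict, Iterable, List, Optional, Tuple
--
-- def normalize_columns(columns: Iterable[str]) -> Dict[str, str]:
--     return {str(col).lower(): col for col in columns}
--
-- def resolve_all_candidates(
--     columns: Iterable[str], candidates: Iterable[str]
-- ) -> List[str]:
--     column_map = normalize_columns(columns)
--     matches: List[str] = []
--     for candidate in candidates or []:
--         match = column_map.get(str(candidate).lower())
--         if match is not None:
--             matches.append(match)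
--     return matches
-- ===== SOURCE B (Python) =====
-- def resolve_all_candidates(columns, candidates):
--     # Loop inversion: iterate COLUMNS in the outer loop, candidates in the inner.
--     # slots[j] holds the most recent column matching candidate j case-insensitively
--     # (later columns overwrite, reproducing dict last-key-wins); unmatched slots drop.
--     targets = [str(c).lower() for c in (candidates or [])]
--     slots = [None] * len(targets)
--     for col in columns:
--         low = str(col).lower()
--         for j, t in enumerate(targets):
--             if t == low:
--                 slots[j] = col
--     return [s for s in slots if s is not None]
-- ===== Notes on version B (the rewrite author's own statement) =====
-- stated objective: alternative
-- what changed: Inverts the loop nesting: instead of building a lowercase-keyed dict and looking up each candidate, B iterates columns in the outer loop and maintains a per-candidate slot array that later matching columns overwrite, then filters unmatched slots.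
import Mathlib
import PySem

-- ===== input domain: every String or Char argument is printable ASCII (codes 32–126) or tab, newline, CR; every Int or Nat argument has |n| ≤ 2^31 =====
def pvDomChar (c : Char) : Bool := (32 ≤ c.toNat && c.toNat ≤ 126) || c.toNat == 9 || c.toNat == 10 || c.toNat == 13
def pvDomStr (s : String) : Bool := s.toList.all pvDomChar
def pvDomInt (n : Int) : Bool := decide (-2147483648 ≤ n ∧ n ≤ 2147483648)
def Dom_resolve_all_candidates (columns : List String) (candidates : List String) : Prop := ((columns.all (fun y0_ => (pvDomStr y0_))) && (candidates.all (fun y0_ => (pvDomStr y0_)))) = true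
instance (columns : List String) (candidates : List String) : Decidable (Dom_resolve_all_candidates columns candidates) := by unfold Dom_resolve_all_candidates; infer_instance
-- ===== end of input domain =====

-- B inverts the loop nesting: it scans columns in the outer loop maintaining a
-- per-candidate slot array that later matches overwrite, instead of A's
-- lowercase-keyed dict lookup per candidate (alternative algorithm, same cost class not claimed faster).


-- ===== PORT A =====
-- {str(col).lower(): col for col in columns}
def normalize_columns (columns : List String) : PySem.Dict String String :=
  columns.foldl (fun d col => d.insert (PySem.Str.lower col) col) PySem.Dict.empty

def resolve_all_candidates (columns : List String) (candidates : List String) : List String :=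
  let column_map := normalize_columns columns
  candidates.foldl (fun acc candidate =>
    match column_map.get? (PySem.Str.lower candidate) with
    | some m => acc ++ [m]
    | none => acc) []

-- ===== PORT B =====
-- one column's pass over the slot array: overwrite every slot whose target matches
def pvSlotStep (col : String) (st : List (String × Option String)) : List (String × Option String) :=
  st.map (fun p => if p.1 == PySem.Str.lower col then (p.1, some col) else p)

def resolve_all_candidates_alt (columns : List String) (candidates : List String) : List String :=
  let targets := candidates.map (fun c => PySem.Str.lower c)
  let slots := columns.foldl (fun st col => pvSlotStep col st)
    (targets.map (fun t => (t, (none : Option String))))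
  slots.filterMap (fun p => p.2)

-- ===== PRECONDITION & SPEC =====
def Spec_resolve_all_candidates (columns : List String) (candidates : List String) (out : List String) : Prop := out = resolve_all_candidates_alt columns candidates
instance (columns : List String) (candidates : List String) (out : List String) : Decidable (Spec_resolve_all_candidates columns candidates out) := by unfold Spec_resolve_all_candidates; infer_instance

-- ===== CLAIM (what is proved, stated in full; the proofs are below) =====
def Claim_equal_resolve_all_candidates : Prop := ∀ (columns : List String) (candidates : List String), Dom_resolve_all_candidates columns candidates → Spec_resolve_all_candidates columns candidates (resolve_all_candidates columns candidates)

-- ===== LEMMAS AND PROOFS =====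

-- the last column matching target t (shared characterisation of both programs)
def pvFindLast (cols : List String) (t : String) : Option String :=
  cols.foldl (fun found col => if t == PySem.Str.lower col then some col else found) none

-- A's incrementally built dict looks up to the last-match scan
theorem get?_foldl_insert_eq_findLast (cols : List String) (t : String)
    (d : PySem.Dict String String) :
    (cols.foldl (fun d col => d.insert (PySem.Str.lower col) col) d).get? t =
      cols.foldl (fun found col => if t == PySem.Str.lower col then some col else found) (d.get? t) := by
  induction cols generalizing d with
  | nil => rfl
  | cons c cs ih =>
    simp only [List.foldl]
    rw [ih]
    congr 1
    rw [PySem.Dict.get?_insert]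
    by_cases h : PySem.Str.lower c = t
    · simp [h]
    · simp [Ne.symm h]

theorem normalize_get?_eq (cols : List String) (t : String) :
    (normalize_columns cols).get? t = pvFindLast cols t := by
  unfold normalize_columns pvFindLast
  rw [get?_foldl_insert_eq_findLast]
  rfl

-- A's append-accumulator loop is a filterMap over candidates
theorem foldl_append_eq_filterMap (cands : List String) (f : String → Option String)
    (acc : List String) :
    (cands.foldl (fun acc c =>
      match f c with
      | some m => acc ++ [m]
      | none => acc) acc) = acc ++ cands.filterMap f := by
  induction cands generalizing acc with
  | nil => simp
  | cons c cs ih =>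
    simp only [List.foldl, List.filterMap_cons]
    cases h : f c <;> simp [ih]

-- B's fold of pointwise passes acts independently on each slot
theorem foldl_slotStep_map (cols : List String) (st : List (String × Option String)) :
    cols.foldl (fun st col => pvSlotStep col st) st =
      st.map (fun p => cols.foldl (fun p col =>
        if p.1 == PySem.Str.lower col then (p.1, some col) else p) p) := by
  induction cols generalizing st with
  | nil => simp
  | cons c cs ih =>
    simp only [List.foldl]
    rw [ih]
    simp only [pvSlotStep, List.map_map]
    rfl

-- one slot's fold keeps its target and accumulates the last match
theorem slot_fold_eq (cols : List String) (t : String) (s : Option String) :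
    cols.foldl (fun (p : String × Option String) col =>
        if p.1 == PySem.Str.lower col then (p.1, some col) else p) (t, s) =
      (t, cols.foldl (fun found col => if t == PySem.Str.lower col then some col else found) s) := by
  induction cols generalizing s with
  | nil => rfl
  | cons c cs ih =>
    simp only [List.foldl]
    by_cases h : (t == PySem.Str.lower c) = true
    · rw [show ((t, s).1 == PySem.Str.lower c) = true from h, if_pos rfl, if_pos rfl, ih]
    · rw [if_neg (by simpa using h), if_neg (by simpa using h), ih]

-- ===== VERDICT (by name: the statement is the Claim_ definition above) =====
theorem resolve_all_candidates_spec : Claim_equal_resolve_all_candidates := by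
  intro columns candidates _
  unfold Spec_resolve_all_candidates
  simp only [resolve_all_candidates, resolve_all_candidates_alt]
  rw [foldl_append_eq_filterMap, foldl_slotStep_map]
  simp only [List.map_map, List.filterMap_map, List.nil_append]
  congr 1
  funext c
  simp only [Function.comp, slot_fold_eq]
  rw [normalize_get?_eq]
  rfl
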